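-- pv_equiv track=rewrite | github.com/fillet54/exp-jq | automationv3/framework/rst.py | _rewrite_meta_directive_for_rendering
-- ===== SOURCE A (Python) =====
-- def _rewrite_meta_directive_for_rendering(text: str) -> str:
--     """
--     Rewrite ``.. meta::`` blocks to ``.. script-meta::`` so metadata is visible
--     in rendered HTML instead of being emitted as head-only meta tags.
--     """
--     lines = text.splitlines()
--     out = []
--     i = 0
--     while i < len(lines):
--         line = lines[i]
--         if line.strip().startswith(".. meta::"):
--             indent = line[: len(line) - len(line.lstrip())]
--             out.append(f"{indent}.. script-meta::")
--             i += 1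
--             while i < len(lines):
--                 body_line = lines[i]
--                 if body_line.strip() == "":
--                     out.append(body_line)
--                     i += 1
--                     continue
--                 if not body_line.startswith(indent + "   "):
--                     break
--                 out.append(body_line)
--                 i += 1
--             continue
--         out.append(line)
--         i += 1
--     return "\n".join(out) + ("\n" if text.endswith("\n") else "")
-- ===== SOURCE B (Python) =====
-- def _rewrite_meta_directive_for_rendering(text: str) -> str:
--     """
--     Rewrite ``.. meta::`` blocks to ``.. script-meta::``.
--     Single flat pass carrying the open block's indent (or None) as state.
--     """
--     out = []
--     block_indent = None
--     for line in text.splitlines():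
--         if block_indent is not None and (
--             line.strip() == "" or line.startswith(block_indent + "   ")
--         ):
--             out.append(line)
--             continue
--         block_indent = None
--         stripped = line.strip()
--         if stripped.startswith(".. meta::"):
--             block_indent = line[: len(line) - len(line.lstrip())]
--             out.append(block_indent + ".. script-meta::")
--         else:
--             out.append(line)
--     return "\n".join(out) + ("\n" if text.endswith("\n") else "")
-- ===== Notes on version B (the rewrite author's own statement) =====
-- stated objective: simpler
-- what changed: Replaced the nested while-loops with explicit index management by one flat fold over the lines that carries the open meta block's indent (or None) as state.
import Mathlib
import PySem

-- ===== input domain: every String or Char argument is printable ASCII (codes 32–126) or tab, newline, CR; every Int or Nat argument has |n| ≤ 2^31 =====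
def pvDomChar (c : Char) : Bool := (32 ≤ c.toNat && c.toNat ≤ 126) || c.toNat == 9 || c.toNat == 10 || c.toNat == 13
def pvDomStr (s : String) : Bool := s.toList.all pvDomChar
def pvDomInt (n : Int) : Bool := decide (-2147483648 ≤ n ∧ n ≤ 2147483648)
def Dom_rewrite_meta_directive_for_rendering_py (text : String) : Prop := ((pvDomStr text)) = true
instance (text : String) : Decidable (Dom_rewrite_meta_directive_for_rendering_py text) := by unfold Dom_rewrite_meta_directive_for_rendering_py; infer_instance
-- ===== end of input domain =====

-- B replaces A's nested while-loops by one flat fold carrying the open block's indent as state (objective: simpler).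

-- ===== PORT A =====
-- indent = line[: len(line) - len(line.lstrip())]  (used verbatim by both Pythons)
def pvIndentOf (l : String) : String :=
  PySem.Str.slice l none (some ((PySem.Str.len l : Int) - (PySem.Str.len (PySem.Str.lstrip l) : Int)))

-- A's inner while: (appended body lines, remaining lines after the break)
def pvInnerA (indent : String) : List String → List String × List String
  | [] => ([], [])
  | l :: rest =>
    if PySem.Str.strip l = "" then
      let p := pvInnerA indent rest
      (l :: p.1, p.2)
    else if !(PySem.Str.startswith l (indent ++ "   ")) then
      ([], l :: rest)
    else
      let p := pvInnerA indent rest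
      (l :: p.1, p.2)

theorem pvInnerA_len (indent : String) : ∀ ls : List String, (pvInnerA indent ls).2.length ≤ ls.length := by
  intro ls
  induction ls with
  | nil => simp [pvInnerA]
  | cons l rest ih =>
    simp only [pvInnerA]
    split
    · simpa using Nat.le_succ_of_le ih
    · split
      · simp
      · simpa using Nat.le_succ_of_le ih

-- A's outer while
def pvOuterA : List String → List String
  | [] => []
  | l :: rest =>
    if PySem.Str.startswith (PySem.Str.strip l) ".. meta::" then
      let indent := pvIndentOf l
      let p := pvInnerA indent rest
      (indent ++ ".. script-meta::") :: (p.1 ++ pvOuterA p.2)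
    else
      l :: pvOuterA rest
termination_by ls => ls.length
decreasing_by
  · exact Nat.lt_succ_of_le (pvInnerA_len _ _)
  · simp

def rewrite_meta_directive_for_rendering_py (text : String) : String :=
  PySem.Str.join "\n" (pvOuterA (PySem.Str.splitlines text)) ++
    (if PySem.Str.endswith text "\n" then "\n" else "")

-- ===== PORT B =====
-- handling of a line outside any block (may open one)
def pvAltNormal (acc : List String) (line : String) : Option String × List String :=
  if PySem.Str.startswith (PySem.Str.strip line) ".. meta::" then
    let ind := pvIndentOf line
    (some ind, acc ++ [ind ++ ".. script-meta::"])
  else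
    (none, acc ++ [line])

-- one step of B's flat state machine: state = (open block's indent?, output so far)
def pvAltStep (st : Option String × List String) (line : String) : Option String × List String :=
  match st.1 with
  | some ind =>
    if PySem.Str.strip line = "" || PySem.Str.startswith line (ind ++ "   ") then
      (some ind, st.2 ++ [line])
    else
      pvAltNormal st.2 line
  | none => pvAltNormal st.2 line

def rewrite_meta_directive_for_rendering_py_alt (text : String) : String :=
  PySem.Str.join "\n" (((PySem.Str.splitlines text).foldl pvAltStep (none, [])).2) ++
    (if PySem.Str.endswith text "\n" then "\n" else "")

-- ===== PRECONDITION & SPEC =====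
def Spec_rewrite_meta_directive_for_rendering_py (text : String) (out : String) : Prop := out = rewrite_meta_directive_for_rendering_py_alt text
instance (text : String) (out : String) : Decidable (Spec_rewrite_meta_directive_for_rendering_py text out) := by unfold Spec_rewrite_meta_directive_for_rendering_py; infer_instance

-- ===== CLAIM (what is proved, stated in full; the proofs are below) =====
def Claim_equal_rewrite_meta_directive_for_rendering_py : Prop := ∀ (text : String), Dom_rewrite_meta_directive_for_rendering_py text → Spec_rewrite_meta_directive_for_rendering_py text (rewrite_meta_directive_for_rendering_py text)

-- ===== LEMMAS AND PROOFS =====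

-- B's fold from a some-state emits exactly A's inner-loop lines, then resumes fresh on the remainder
theorem pvAlt_inner (ind : String) : ∀ (ls acc : List String),
    (ls.foldl pvAltStep (some ind, acc)).2 =
      ((pvInnerA ind ls).2.foldl pvAltStep (none, acc ++ (pvInnerA ind ls).1)).2 := by
  intro ls
  induction ls with
  | nil => intro acc; simp [pvInnerA]
  | cons l rest ih =>
    intro acc
    by_cases hb : PySem.Str.strip l = ""
    · simp [List.foldl, pvAltStep, pvInnerA, hb, ih]
    · by_cases hs : PySem.Chars.startswith l.toList (ind.toList ++ [' ', ' ', ' ']) = true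
      · simp [List.foldl, pvAltStep, pvInnerA, hb, hs, ih]
      · simp [List.foldl, pvAltStep, pvAltNormal, pvInnerA, hb, hs]

-- B's fold from the none-state computes A's outer loop (strong induction on length)
theorem pvAlt_none : ∀ (n : Nat) (ls : List String), ls.length ≤ n → ∀ acc : List String,
    (ls.foldl pvAltStep (none, acc)).2 = acc ++ pvOuterA ls := by
  intro n
  induction n with
  | zero =>
    intro ls hls acc
    have : ls = [] := List.eq_nil_of_length_eq_zero (Nat.le_zero.mp hls)
    subst this; simp [pvOuterA]
  | succ n ih =>
    intro ls hls acc
    cases ls with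
    | nil => simp [pvOuterA]
    | cons l rest =>
      have hr : rest.length ≤ n := by simpa using Nat.lt_succ_iff.mp (Nat.lt_of_lt_of_le (by simp) hls)
      by_cases hm : PySem.Chars.startswith (PySem.Chars.strip l.toList) ['.', '.', ' ', 'm', 'e', 't', 'a', ':', ':'] = true
      · have hlen : (pvInnerA (pvIndentOf l) rest).2.length ≤ n :=
          le_trans (pvInnerA_len _ _) hr
        have h1 : pvAltStep (none, acc) l =
            (some (pvIndentOf l), acc ++ [pvIndentOf l ++ ".. script-meta::"]) := by
          simp [pvAltStep, pvAltNormal, hm]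
        rw [List.foldl_cons, h1, pvAlt_inner, ih _ hlen]
        simp [pvOuterA, hm]
      · have h1 : pvAltStep (none, acc) l = (none, acc ++ [l]) := by
          simp [pvAltStep, pvAltNormal, hm]
        rw [List.foldl_cons, h1, ih rest hr]
        simp [pvOuterA, hm]

-- ===== VERDICT (by name: the statement is the Claim_ definition above) =====
theorem rewrite_meta_directive_for_rendering_py_spec : Claim_equal_rewrite_meta_directive_for_rendering_py := by
  intro text _
  unfold Spec_rewrite_meta_directive_for_rendering_py
  unfold rewrite_meta_directive_for_rendering_py rewrite_meta_directive_for_rendering_py_alt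
  rw [pvAlt_none (PySem.Str.splitlines text).length _ le_rfl []]
  simp
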